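-- pv_equiv track=rewrite | github.com/GluteusStrength/Algorithm | 백준/Gold/1744. 수 묶기/수 묶기.py | sum
-- ===== SOURCE A (Python) =====
-- def sum(l, x):
--     if l:
--         if l[-1] > 0: # right가 들어오는 case
--             if 1 not in l:
--                 while len(l) > 1:
--                     r = 1
--                     for i in range(2):
--                         r *= l.pop()
--                     x += r
--                 if l:
--                     x += l.pop()
--                     return x
--                 else:
--                     return x
--             else:
--                 k = 0
--                 while 1 in l:
--                     k += 1
--                     l.remove(1)
--                 while len(l) > 1:
--                     r = 1
--                     for _ in range(2):
--                         r *= l.pop()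
--                     x += r
--                 if l:
--                     x += l.pop()
--                     return x + k
--                 else:
--                     return x + k
--         else: # left가 들어오는 case
--             while len(l) > 1:
--                 r = 1
--                 for _ in range(2):
--                     r *= l[0]
--                     l.remove(l[0])
--                 x += r
--             if l:
--                 x += l.pop()
--                 return x
--             else:
--                 return x
--     else:
--         return x
-- ===== SOURCE B (Python) =====
-- # B: pure single-pass re-implementation — counts/filters 1s once and pairs adjacent
-- # elements of a normalized sequence, instead of A's repeated list mutation (pop/remove)
-- # and O(n^2) `while 1 in l: l.remove(1)` scan. Return-value equivalence only: A mutates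
-- # its list argument in place, B does not.
-- def sum(l, x):
--     if not l:
--         return x
--     if l[-1] > 0:
--         return x + l.count(1) + _pair_sum([v for v in l if v != 1][::-1])
--     return x + _pair_sum(l)
--
-- def _pair_sum(seq):
--     total = 0
--     it = iter(seq)
--     for a in it:
--         b = next(it, None)
--         total += a if b is None else a * b
--     return total
-- ===== Notes on version B (the rewrite author's own statement) =====
-- stated objective: faster
-- what changed: Replaces A's three in-place mutation loops (pop-from-end pairing, a repeated `while 1 in l: l.remove(1)` scan, and front-removal pairing) with one pure pass: count and filter the 1s once, then sum adjacent products of the normalized sequence with a single two-at-a-time iterator; A's list argument is mutated, B leaves it intact (return values are equal).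
import Mathlib
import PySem

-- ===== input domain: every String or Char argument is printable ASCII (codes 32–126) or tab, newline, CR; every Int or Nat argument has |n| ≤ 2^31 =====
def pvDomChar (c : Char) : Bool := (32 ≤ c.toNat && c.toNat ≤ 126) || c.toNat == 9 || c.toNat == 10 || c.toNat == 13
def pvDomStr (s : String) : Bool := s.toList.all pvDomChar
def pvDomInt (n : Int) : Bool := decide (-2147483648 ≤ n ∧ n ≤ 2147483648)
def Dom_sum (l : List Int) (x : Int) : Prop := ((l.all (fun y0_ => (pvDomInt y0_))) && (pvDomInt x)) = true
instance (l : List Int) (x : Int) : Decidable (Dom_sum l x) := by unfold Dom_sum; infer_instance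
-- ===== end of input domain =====

-- B restructures A's three in-place mutation loops (pop/remove) into one pure pairing pass
-- over a normalized sequence, removing the quadratic `while 1 in l: l.remove(1)` scan.
-- Equivalence is about the RETURN value only: Python A mutates its list argument, B does not.

-- ===== PORT A =====
-- `while len(l) > 1: r = l.pop()*l.pop(); x += r` then `if l: x += l.pop()`
-- (pop from the END; the .getD defaults are never used: the guards keep the list long enough)
def sumLoopBack (l : List Int) (x : Int) : Int :=
  if l.length > 1 then
    sumLoopBack l.dropLast.dropLast (x + l.getLast?.getD 1 * l.dropLast.getLast?.getD 1)
  else if l = [] then x else x + l.getLast?.getD 0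
termination_by l.length
decreasing_by simp [List.length_dropLast]; omega

-- `while 1 in l: k += 1; l.remove(1)` (Python list.remove = List.erase: first occurrence)
def sumRemoveOnes (l : List Int) (k : Int) : List Int × Int :=
  if h : 1 ∈ l then sumRemoveOnes (l.erase 1) (k + 1) else (l, k)
termination_by l.length
decreasing_by
  have h1 := List.length_erase_of_mem h
  have h2 := List.length_pos_of_mem h
  omega

-- left case: `r *= l[0]; l.remove(l[0])` twice = take the two FRONT elements
def sumLoopFront (l : List Int) (x : Int) : Int :=
  match l with
  | a :: b :: t => sumLoopFront t (x + a * b)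
  | [a] => x + a
  | [] => x

def sum (l : List Int) (x : Int) : Int :=
  if l ≠ [] then
    if l.getLast?.getD 0 > 0 then
      if ¬ (1 ∈ l) then
        sumLoopBack l x
      else
        let p := sumRemoveOnes l 0
        sumLoopBack p.1 x + p.2
    else
      sumLoopFront l x
  else x

-- ===== PORT B =====
-- _pair_sum: consume the sequence two elements at a time, multiplying pairs
def pairSum : List Int → Int
  | [] => 0
  | [a] => a
  | a :: b :: t => a * b + pairSum t

def sum_alt (l : List Int) (x : Int) : Int :=
  if l = [] then x
  else if l.getLast?.getD 0 > 0 then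
    x + (l.count 1 : Int) + pairSum ((l.filter (fun v => v ≠ 1)).reverse)
  else
    x + pairSum l

-- ===== PRECONDITION & SPEC =====
def Spec_sum (l : List Int) (x : Int) (out : Int) : Prop := out = sum_alt l x
instance (l : List Int) (x : Int) (out : Int) : Decidable (Spec_sum l x out) := by unfold Spec_sum; infer_instance

-- ===== CLAIM (what is proved, stated in full; the proofs are below) =====
def Claim_equal_sum : Prop := ∀ (l : List Int) (x : Int), Dom_sum l x → Spec_sum l x (sum l x)

-- ===== LEMMAS AND PROOFS =====

lemma sumLoopFront_eq (l : List Int) (x : Int) : sumLoopFront l x = x + pairSum l := by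
  induction l using pairSum.induct generalizing x with
  | case1 => simp [sumLoopFront, pairSum]
  | case2 a => simp [sumLoopFront, pairSum]
  | case3 a b t ih => simp [sumLoopFront, pairSum, ih]; ring

lemma sumLoopBack_reverse (r : List Int) (x : Int) :
    sumLoopBack r.reverse x = x + pairSum r := by
  induction r using pairSum.induct generalizing x with
  | case1 => simp [sumLoopBack, pairSum]
  | case2 a => simp [sumLoopBack, pairSum]
  | case3 a b t ih =>
    rw [sumLoopBack]
    have hrev : (a :: b :: t).reverse = (t.reverse ++ [b]) ++ [a] := by simp
    rw [hrev]
    simp only [List.length_append, List.length_singleton, List.dropLast_concat,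
      List.getLast?_concat, Option.getD_some]
    rw [if_pos (by omega)]
    rw [ih]
    simp [pairSum]; ring

lemma filter_erase_one (l : List Int) :
    (l.erase 1).filter (fun v => v ≠ 1) = l.filter (fun v => v ≠ 1) := by
  induction l with
  | nil => rfl
  | cons a t ih =>
    by_cases h : a = 1
    · subst h
      have he : ((1 : Int) :: t).erase 1 = t := by simp
      rw [he, List.filter_cons]
      simp
    · have he : ((a : Int) :: t).erase 1 = a :: t.erase 1 := by simp [h]
      rw [he, List.filter_cons, List.filter_cons, ih]

lemma sumRemoveOnes_eq (l : List Int) (k : Int) :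
    sumRemoveOnes l k = (l.filter (fun v => v ≠ 1), k + (l.count 1 : Int)) := by
  induction l, k using sumRemoveOnes.induct with
  | case1 l k h ih =>
    have hc : (l.erase 1).count 1 = l.count 1 - 1 := List.count_erase_self
    have hpos : 0 < l.count 1 := List.count_pos_iff.mpr h
    rw [sumRemoveOnes, dif_pos h, ih, filter_erase_one, hc]
    simp only [Prod.mk.injEq, true_and]
    omega
  | case2 l k h =>
    have hc : l.count 1 = 0 := List.count_eq_zero.mpr h
    have hf : l.filter (fun v => v ≠ 1) = l := by
      apply List.filter_eq_self.mpr
      intro a ha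
      simp only [ne_eq, decide_eq_true_eq]
      intro he; exact h (he ▸ ha)
    rw [sumRemoveOnes, dif_neg h, hf, hc]
    simp

-- ===== VERDICT (by name: the statement is the Claim_ definition above) =====
theorem sum_spec : Claim_equal_sum := by
  intro l x _
  unfold Spec_sum sum sum_alt
  by_cases hl : l = []
  · simp [hl]
  · rw [if_pos hl, if_neg hl]
    by_cases hpos : l.getLast?.getD 0 > 0
    · rw [if_pos hpos, if_pos hpos]
      by_cases hone : 1 ∈ l
      · rw [if_neg (by simpa using hone)]
        simp only [sumRemoveOnes_eq]
        have hb := sumLoopBack_reverse ((l.filter (fun v => v ≠ 1)).reverse) x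
        rw [List.reverse_reverse] at hb
        rw [hb]
        ring
      · rw [if_pos (by simpa using hone)]
        have hf : l.filter (fun v => v ≠ 1) = l := by
          apply List.filter_eq_self.mpr
          intro a ha
          simp only [ne_eq, decide_eq_true_eq]
          intro he; exact hone (he ▸ ha)
        have hc : l.count 1 = 0 := List.count_eq_zero.mpr hone
        have hb := sumLoopBack_reverse l.reverse x
        rw [List.reverse_reverse] at hb
        rw [hf, hc, hb]
        simp
    · rw [if_neg hpos, if_neg hpos, sumLoopFront_eq]
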